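-- pv_equiv track=rewrite | github.com/JHoooooon/getting_start_python_codingtest | cow_baseball/main.py | get_better_satisfied_cow_locs
-- ===== SOURCE A (Python) =====
-- def get_better_satisfied_cow_locs(cow_locs: list[int]) -> int:
--     """
--     선형탐색
--     아래는 for 문은 2번 중첩하며 필요한 수만큼 while 문을 돌린다
--     이렇게 왼쪽에서부터 오른쪽 인덱스를 찾기 위해 스캔하는 방식을 선형탐색이라 한다
--     이는 아까보다는 효율적이지만, 아직 효율적인 코드는 아니다
--
--     Args:
--         cow_locs (list[int]): 소의 위치 배열
--
--     Returns:
--         int: 투구거리에 만족하는 소의 위치 개수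
--     """
--     #   위치를 정렬한다
--     sorted_cow_locs = sorted(cow_locs, key=int)
--     cow_locs_len = len(cow_locs)
--
--     # total 값
--     total = 0
--
--     # location 계산
--     for i in range(cow_locs_len):
--         #   i + 1 한 값부터 순회
--         for j in range(i + 1, cow_locs_len):
--             #   j 인덱스 값에서 i 인덱스 값의 차는 첫번째 구간 간격
--             difference_loc = sorted_cow_locs[j] - sorted_cow_locs[i]
--             #   두번째 소 위치 + 첫번째 구간간격 =  두번째 구간간격의 최소간격
--             low = sorted_cow_locs[j] + difference_loc
--             #   두번째 소 위치 + 두번째 구간간격 * 2 =  두번째 구간간격의 최고간격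
--             high = sorted_cow_locs[j] + difference_loc * 2
--
--             #   최소 구간간격에 만족하는 위치값 인덱스
--             #   초기값은 j + 1 부터 시작
--             left = j + 1
--
--             #   최소 구간간격에 만족하는 위차값 인덱스 - 1 까지 순회
--             while left < cow_locs_len and sorted_cow_locs[left] < low:
--                 left += 1
--
--             #   최소 구간간격에 만족하는 위치값부터 최대 구간간격에 맞족하는 위치값 인덱스
--             #   초기값은 left(최소 구간간격에 만족하는 인덱스 - 1) 이다
--             right = left
--
--             #   최소 구간간격에서 시작하여, 최대 구간간격까지의 인덱스
--             while right < cow_locs_len and sorted_cow_locs[right] <= high: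
--                 right += 1
--
--             #   최대 구간간격 인덱스 - (최소 구간간격 - 1 인덱스) = 만족하는 구간간격 개수
--             total = total + right - left
--
--     return total;
-- ===== SOURCE B (Python) =====
-- def _bisect_left(a, x, lo, hi):
--     while lo < hi:
--         mid = (lo + hi) // 2
--         if a[mid] < x:
--             lo = mid + 1
--         else:
--             hi = mid
--     return lo
--
--
-- def _bisect_right(a, x, lo, hi):
--     while lo < hi:
--         mid = (lo + hi) // 2
--         if a[mid] <= x:
--             lo = mid + 1
--         else:
--             hi = mid
--     return lo
--
--
-- def get_better_satisfied_cow_locs(cow_locs: list[int]) -> int: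
--     a = sorted(cow_locs)
--     n = len(a)
--     total = 0
--     for i in range(n):
--         for j in range(i + 1, n):
--             d = a[j] - a[i]
--             lo = _bisect_left(a, a[j] + d, j + 1, n)
--             hi = _bisect_right(a, a[j] + 2 * d, j + 1, n)
--             total += hi - lo
--     return total
-- ===== Notes on version B (the rewrite author's own statement) =====
-- stated objective: faster
-- what changed: replaces A's two linear while-scans per pair with hand-written binary searches (bisect_left/bisect_right with lo/hi bounds) over the sorted array
import Mathlib
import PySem

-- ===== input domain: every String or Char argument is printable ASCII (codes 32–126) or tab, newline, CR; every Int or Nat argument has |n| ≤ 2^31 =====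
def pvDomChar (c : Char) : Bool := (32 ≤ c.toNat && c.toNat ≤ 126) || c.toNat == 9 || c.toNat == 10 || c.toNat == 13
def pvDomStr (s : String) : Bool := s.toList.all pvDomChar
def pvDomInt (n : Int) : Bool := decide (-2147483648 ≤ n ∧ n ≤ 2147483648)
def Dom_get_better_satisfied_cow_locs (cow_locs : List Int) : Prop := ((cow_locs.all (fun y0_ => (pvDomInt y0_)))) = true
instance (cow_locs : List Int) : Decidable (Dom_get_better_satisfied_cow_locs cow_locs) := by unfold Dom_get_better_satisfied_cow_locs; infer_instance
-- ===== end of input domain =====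

-- B replaces A's two linear while-scans per pair with bounded binary searches over the sorted array.

-- shared index access: a[k] for a Nat index that is always in range in both programs
def pvG (a : List Int) (k : Nat) : Int := a.getD k 0

-- ===== PORT A =====
-- 'while left < n and sorted_cow_locs[left] < low: left += 1'
def pvWhileLt (a : List Int) (n : Nat) (low : Int) (left : Nat) : Nat :=
  if h : left < n ∧ pvG a left < low then pvWhileLt a n low (left + 1) else left
termination_by n - left
decreasing_by omega

-- 'while right < n and sorted_cow_locs[right] <= high: right += 1'
def pvWhileLe (a : List Int) (n : Nat) (high : Int) (right : Nat) : Nat :=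
  if h : right < n ∧ pvG a right ≤ high then pvWhileLe a n high (right + 1) else right
termination_by n - right
decreasing_by omega

-- key=int is the identity on ints, ported as (fun x => x)
def get_better_satisfied_cow_locs (cow_locs : List Int) : Int :=
  let sorted_cow_locs := PySem.List.sorted cow_locs (fun x => x) false
  let n := cow_locs.length
  (List.range n).foldl (fun total i =>
    (List.range' (i + 1) (n - (i + 1))).foldl (fun total j =>
      let difference_loc := pvG sorted_cow_locs j - pvG sorted_cow_locs i
      let low := pvG sorted_cow_locs j + difference_loc
      let high := pvG sorted_cow_locs j + difference_loc * 2
      let left := pvWhileLt sorted_cow_locs n low (j + 1)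
      let right := pvWhileLe sorted_cow_locs n high left
      total + (right : Int) - (left : Int)) total) 0

-- ===== PORT B =====
-- '_bisect_left(a, x, lo, hi)' from Source B, the while loop as recursion on the shrinking interval
def pvBisectL (a : List Int) (x : Int) (lo hi : Nat) : Nat :=
  if h : lo < hi then
    let mid := (lo + hi) / 2
    if pvG a mid < x then pvBisectL a x (mid + 1) hi else pvBisectL a x lo mid
  else lo
termination_by hi - lo
decreasing_by all_goals omega

-- '_bisect_right(a, x, lo, hi)' from Source B
def pvBisectR (a : List Int) (x : Int) (lo hi : Nat) : Nat :=
  if h : lo < hi then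
    let mid := (lo + hi) / 2
    if pvG a mid ≤ x then pvBisectR a x (mid + 1) hi else pvBisectR a x lo mid
  else lo
termination_by hi - lo
decreasing_by all_goals omega

def get_better_satisfied_cow_locs_alt (cow_locs : List Int) : Int :=
  let a := PySem.List.sorted cow_locs (fun x => x) false
  let n := a.length
  (List.range n).foldl (fun total i =>
    (List.range' (i + 1) (n - (i + 1))).foldl (fun total j =>
      let d := pvG a j - pvG a i
      let lo := pvBisectL a (pvG a j + d) (j + 1) n
      let hi := pvBisectR a (pvG a j + 2 * d) (j + 1) n
      total + ((hi : Int) - (lo : Int))) total) 0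

-- ===== PRECONDITION & SPEC =====
def Spec_get_better_satisfied_cow_locs (cow_locs : List Int) (out : Int) : Prop := out = get_better_satisfied_cow_locs_alt cow_locs
instance (cow_locs : List Int) (out : Int) : Decidable (Spec_get_better_satisfied_cow_locs cow_locs out) := by unfold Spec_get_better_satisfied_cow_locs; infer_instance

-- ===== CLAIM (what is proved, stated in full; the proofs are below) =====
def Claim_equal_get_better_satisfied_cow_locs : Prop := ∀ (cow_locs : List Int), Dom_get_better_satisfied_cow_locs cow_locs → Spec_get_better_satisfied_cow_locs cow_locs (get_better_satisfied_cow_locs cow_locs)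

-- ===== LEMMAS AND PROOFS =====

-- unfolding equations for the binary searches (zeta-reduced forms)
theorem pvBisectL_step (a : List Int) (x : Int) (lo hi : Nat) (h : lo < hi) :
    pvBisectL a x lo hi =
      if pvG a ((lo + hi) / 2) < x then pvBisectL a x ((lo + hi) / 2 + 1) hi
      else pvBisectL a x lo ((lo + hi) / 2) := by
  rw [pvBisectL, dif_pos h]

theorem pvBisectL_stop (a : List Int) (x : Int) (lo hi : Nat) (h : ¬ lo < hi) :
    pvBisectL a x lo hi = lo := by
  rw [pvBisectL, dif_neg h]

theorem pvBisectR_step (a : List Int) (x : Int) (lo hi : Nat) (h : lo < hi) :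
    pvBisectR a x lo hi =
      if pvG a ((lo + hi) / 2) ≤ x then pvBisectR a x ((lo + hi) / 2 + 1) hi
      else pvBisectR a x lo ((lo + hi) / 2) := by
  rw [pvBisectR, dif_pos h]

theorem pvBisectR_stop (a : List Int) (x : Int) (lo hi : Nat) (h : ¬ lo < hi) :
    pvBisectR a x lo hi = lo := by
  rw [pvBisectR, dif_neg h]

-- a partition point of a monotone-down predicate on [s, n) is unique
theorem pv_part_unique (P : Nat → Prop) (s n r1 r2 : Nat)
    (h1a : s ≤ r1) (h1b : r1 ≤ n) (h1c : ∀ k, s ≤ k → k < r1 → P k) (h1d : ∀ k, r1 ≤ k → k < n → ¬ P k)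
    (h2a : s ≤ r2) (h2b : r2 ≤ n) (h2c : ∀ k, s ≤ k → k < r2 → P k) (h2d : ∀ k, r2 ≤ k → k < n → ¬ P k) :
    r1 = r2 := by
  rcases lt_trichotomy r1 r2 with h | h | h
  · exact absurd (h2c r1 h1a h) (h1d r1 le_rfl (lt_of_lt_of_le h h2b))
  · exact h
  · exact absurd (h1c r2 h2a h) (h2d r2 le_rfl (lt_of_lt_of_le h h1b))

theorem pvWhileLt_char (a : List Int) (n : Nat) (low : Int) :
    ∀ m left, n - left ≤ m → left ≤ n →
      left ≤ pvWhileLt a n low left ∧ pvWhileLt a n low left ≤ n ∧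
      (∀ k, left ≤ k → k < pvWhileLt a n low left → pvG a k < low) ∧
      (pvWhileLt a n low left < n → ¬ pvG a (pvWhileLt a n low left) < low) := by
  intro m
  induction m with
  | zero =>
    intro left hm hle
    have hln : left = n := by omega
    subst hln
    have hstop : ¬ (left < left ∧ pvG a left < low) := fun hc => absurd hc.1 (lt_irrefl left)
    rw [pvWhileLt, dif_neg hstop]
    exact ⟨le_rfl, le_rfl, fun k h1 h2 => by omega, fun h => by omega⟩
  | succ m ih =>
    intro left hm hle
    rw [pvWhileLt]
    by_cases h : left < n ∧ pvG a left < low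
    · rw [dif_pos h]
      obtain ⟨ih1, ih2, ih3, ih4⟩ := ih (left + 1) (by omega) (by omega)
      refine ⟨by omega, ih2, ?_, ih4⟩
      intro k hk1 hk2
      rcases Nat.eq_or_lt_of_le hk1 with heq | hlt
      · exact heq ▸ h.2
      · exact ih3 k hlt hk2
    · rw [dif_neg h]
      exact ⟨le_rfl, hle, fun k h1 h2 => by omega, fun hlt hcon => h ⟨hlt, hcon⟩⟩

theorem pvWhileLe_char (a : List Int) (n : Nat) (high : Int) :
    ∀ m left, n - left ≤ m → left ≤ n →
      left ≤ pvWhileLe a n high left ∧ pvWhileLe a n high left ≤ n ∧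
      (∀ k, left ≤ k → k < pvWhileLe a n high left → pvG a k ≤ high) ∧
      (pvWhileLe a n high left < n → ¬ pvG a (pvWhileLe a n high left) ≤ high) := by
  intro m
  induction m with
  | zero =>
    intro left hm hle
    have hln : left = n := by omega
    subst hln
    have hstop : ¬ (left < left ∧ pvG a left ≤ high) := fun hc => absurd hc.1 (lt_irrefl left)
    rw [pvWhileLe, dif_neg hstop]
    exact ⟨le_rfl, le_rfl, fun k h1 h2 => by omega, fun h => by omega⟩
  | succ m ih =>
    intro left hm hle
    rw [pvWhileLe]
    by_cases h : left < n ∧ pvG a left ≤ high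
    · rw [dif_pos h]
      obtain ⟨ih1, ih2, ih3, ih4⟩ := ih (left + 1) (by omega) (by omega)
      refine ⟨by omega, ih2, ?_, ih4⟩
      intro k hk1 hk2
      rcases Nat.eq_or_lt_of_le hk1 with heq | hlt
      · exact heq ▸ h.2
      · exact ih3 k hlt hk2
    · rw [dif_neg h]
      exact ⟨le_rfl, hle, fun k h1 h2 => by omega, fun hlt hcon => h ⟨hlt, hcon⟩⟩

theorem pvBisectL_char (a : List Int) (x : Int)
    (hmono : ∀ p q, p ≤ q → q < a.length → pvG a p ≤ pvG a q) :
    ∀ m lo hi, hi - lo ≤ m → lo ≤ hi → hi ≤ a.length →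
      lo ≤ pvBisectL a x lo hi ∧ pvBisectL a x lo hi ≤ hi ∧
      (∀ k, lo ≤ k → k < pvBisectL a x lo hi → pvG a k < x) ∧
      (∀ k, pvBisectL a x lo hi ≤ k → k < hi → ¬ pvG a k < x) := by
  intro m
  induction m with
  | zero =>
    intro lo hi hm h1 h2
    have hlh : lo = hi := by omega
    subst hlh
    rw [pvBisectL_stop a x lo lo (lt_irrefl lo)]
    exact ⟨le_rfl, le_rfl, fun k hk1 hk2 => by omega, fun k hk1 hk2 => by omega⟩
  | succ m ih =>
    intro lo hi hm h1 h2
    by_cases h : lo < hi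
    · rw [pvBisectL_step a x lo hi h]
      have hmlo : lo ≤ (lo + hi) / 2 := by omega
      have hmhi : (lo + hi) / 2 < hi := by omega
      by_cases hc : pvG a ((lo + hi) / 2) < x
      · rw [if_pos hc]
        obtain ⟨ih1, ih2, ih3, ih4⟩ := ih ((lo + hi) / 2 + 1) hi (by omega) (by omega) h2
        refine ⟨by omega, ih2, ?_, ih4⟩
        intro k hk1 hk2
        by_cases hkm : k ≤ (lo + hi) / 2
        · exact lt_of_le_of_lt (hmono k ((lo + hi) / 2) hkm (by omega)) hc
        · exact ih3 k (by omega) hk2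
      · rw [if_neg hc]
        obtain ⟨ih1, ih2, ih3, ih4⟩ := ih lo ((lo + hi) / 2) (by omega) (by omega) (by omega)
        refine ⟨ih1, by omega, ih3, ?_⟩
        intro k hk1 hk2
        by_cases hkm : k < (lo + hi) / 2
        · exact ih4 k hk1 hkm
        · intro hcon
          exact hc (lt_of_le_of_lt (hmono ((lo + hi) / 2) k (by omega) (by omega)) hcon)
    · rw [pvBisectL_stop a x lo hi h]
      have hlh : lo = hi := by omega
      subst hlh
      exact ⟨le_rfl, le_rfl, fun k hk1 hk2 => by omega, fun k hk1 hk2 => by omega⟩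

theorem pvBisectR_char (a : List Int) (x : Int)
    (hmono : ∀ p q, p ≤ q → q < a.length → pvG a p ≤ pvG a q) :
    ∀ m lo hi, hi - lo ≤ m → lo ≤ hi → hi ≤ a.length →
      lo ≤ pvBisectR a x lo hi ∧ pvBisectR a x lo hi ≤ hi ∧
      (∀ k, lo ≤ k → k < pvBisectR a x lo hi → pvG a k ≤ x) ∧
      (∀ k, pvBisectR a x lo hi ≤ k → k < hi → ¬ pvG a k ≤ x) := by
  intro m
  induction m with
  | zero =>
    intro lo hi hm h1 h2
    have hlh : lo = hi := by omega
    subst hlh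
    rw [pvBisectR_stop a x lo lo (lt_irrefl lo)]
    exact ⟨le_rfl, le_rfl, fun k hk1 hk2 => by omega, fun k hk1 hk2 => by omega⟩
  | succ m ih =>
    intro lo hi hm h1 h2
    by_cases h : lo < hi
    · rw [pvBisectR_step a x lo hi h]
      have hmlo : lo ≤ (lo + hi) / 2 := by omega
      have hmhi : (lo + hi) / 2 < hi := by omega
      by_cases hc : pvG a ((lo + hi) / 2) ≤ x
      · rw [if_pos hc]
        obtain ⟨ih1, ih2, ih3, ih4⟩ := ih ((lo + hi) / 2 + 1) hi (by omega) (by omega) h2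
        refine ⟨by omega, ih2, ?_, ih4⟩
        intro k hk1 hk2
        by_cases hkm : k ≤ (lo + hi) / 2
        · exact le_trans (hmono k ((lo + hi) / 2) hkm (by omega)) hc
        · exact ih3 k (by omega) hk2
      · rw [if_neg hc]
        obtain ⟨ih1, ih2, ih3, ih4⟩ := ih lo ((lo + hi) / 2) (by omega) (by omega) (by omega)
        refine ⟨ih1, by omega, ih3, ?_⟩
        intro k hk1 hk2
        by_cases hkm : k < (lo + hi) / 2
        · exact ih4 k hk1 hkm
        · intro hcon
          exact hc (le_trans (hmono ((lo + hi) / 2) k (by omega) (by omega)) hcon)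
    · rw [pvBisectR_stop a x lo hi h]
      have hlh : lo = hi := by omega
      subst hlh
      exact ⟨le_rfl, le_rfl, fun k hk1 hk2 => by omega, fun k hk1 hk2 => by omega⟩

-- the sorted list is monotone under pvG
theorem pv_mono_sorted (cow_locs : List Int) :
    ∀ p q, p ≤ q → q < (PySem.List.sorted cow_locs (fun x => x) false).length →
      pvG (PySem.List.sorted cow_locs (fun x => x) false) p ≤
      pvG (PySem.List.sorted cow_locs (fun x => x) false) q := by
  intro p q hpq hq
  unfold pvG
  rw [List.getD_eq_getElem _ _ (by omega), List.getD_eq_getElem _ _ hq]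
  exact PySem.List.key_sorted_getElem_mono cow_locs (fun x => x) hpq hq

-- for i < j < n, A's pair of scans stops at the same two indices as B's pair of binary searches
theorem pv_inner_eq (a : List Int)
    (hmono : ∀ p q, p ≤ q → q < a.length → pvG a p ≤ pvG a q)
    (i j : Nat) (hij : i < j) (hj : j < a.length) :
    pvWhileLt a a.length (pvG a j + (pvG a j - pvG a i)) (j + 1) =
      pvBisectL a (pvG a j + (pvG a j - pvG a i)) (j + 1) a.length ∧
    pvWhileLe a a.length (pvG a j + (pvG a j - pvG a i) * 2)
        (pvWhileLt a a.length (pvG a j + (pvG a j - pvG a i)) (j + 1)) =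
      pvBisectR a (pvG a j + 2 * (pvG a j - pvG a i)) (j + 1) a.length := by
  set n := a.length with hn
  set low := pvG a j + (pvG a j - pvG a i) with hlow
  have hd : 0 ≤ pvG a j - pvG a i := by
    have := hmono i j (le_of_lt hij) hj
    omega
  have hjn : j + 1 ≤ n := hj
  obtain ⟨w1, w2, w3, w4⟩ := pvWhileLt_char a n low (n - (j + 1)) (j + 1) le_rfl hjn
  obtain ⟨b1, b2, b3, b4⟩ := pvBisectL_char a low hmono (n - (j + 1)) (j + 1) n le_rfl hjn le_rfl
  set left := pvWhileLt a n low (j + 1) with hleft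
  set lo := pvBisectL a low (j + 1) n with hlo
  have w4' : ∀ k, left ≤ k → k < n → ¬ pvG a k < low := by
    intro k hk1 hk2 hcon
    have hlk : pvG a left ≤ pvG a k := hmono left k hk1 hk2
    exact w4 (by omega) (by omega)
  have heq1 : left = lo :=
    pv_part_unique (fun k => pvG a k < low) (j + 1) n left lo w1 w2 w3 w4' b1 b2 b3 b4
  refine ⟨heq1, ?_⟩
  set high := pvG a j + (pvG a j - pvG a i) * 2 with hhigh
  have hlh : low ≤ high := by omega
  obtain ⟨v1, v2, v3, v4⟩ := pvWhileLe_char a n high (n - left) left le_rfl w2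
  have h2d : pvG a j + 2 * (pvG a j - pvG a i) = high := by rw [hhigh]; ring
  rw [h2d]
  obtain ⟨c1, c2, c3, c4⟩ := pvBisectR_char a high hmono (n - (j + 1)) (j + 1) n le_rfl hjn le_rfl
  set right := pvWhileLe a n high left with hright
  set hi := pvBisectR a high (j + 1) n with hhi
  have v4' : ∀ k, right ≤ k → k < n → ¬ pvG a k ≤ high := by
    intro k hk1 hk2 hcon
    have : pvG a right ≤ pvG a k := hmono right k hk1 hk2
    exact v4 (by omega) (by omega)
  have v3' : ∀ k, j + 1 ≤ k → k < right → pvG a k ≤ high := by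
    intro k hk1 hk2
    by_cases hkl : k < left
    · exact le_trans (le_of_lt (w3 k hk1 hkl)) hlh
    · exact v3 k (by omega) hk2
  exact pv_part_unique (fun k => pvG a k ≤ high) (j + 1) n right hi
    (le_trans w1 v1) v2 v3' v4' c1 c2 c3 c4

-- ===== VERDICT (by name: the statement is the Claim_ definition above) =====
theorem get_better_satisfied_cow_locs_spec : Claim_equal_get_better_satisfied_cow_locs := by
  intro cow_locs _
  unfold Spec_get_better_satisfied_cow_locs
  simp only [get_better_satisfied_cow_locs, get_better_satisfied_cow_locs_alt]
  have hlen : (PySem.List.sorted cow_locs (fun x => x) false).length = cow_locs.length :=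
    PySem.List.length_sorted cow_locs _ _
  set a := PySem.List.sorted cow_locs (fun x => x) false with ha
  have hmono := pv_mono_sorted cow_locs
  rw [← ha] at hmono
  rw [← hlen]
  apply PySem.List.foldl_congr_mem
  intro total i hi
  have hi' : i < a.length := List.mem_range.mp hi
  apply PySem.List.foldl_congr_mem
  intro total j hjmem
  have hj' : i + 1 ≤ j ∧ j < i + 1 + (a.length - (i + 1)) := List.mem_range'_1.mp hjmem
  have hj : j < a.length := by omega
  obtain ⟨e1, e2⟩ := pv_inner_eq a hmono i j (by omega) hj
  rw [e2, e1]
  ring
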